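-- pv_equiv track=rewrite | github.com/Brokenbass90/by-bot | forex/touch_quality.py | touches_are_independent
-- ===== SOURCE A (Python) =====
-- from typing import List
--
-- def touches_are_independent(
--     touch_indices: List[int],
--     min_separation: int = 5,
-- ) -> bool:
--     """
--     Check that no two touches are within `min_separation` bars of each other.
--
--     Purpose: if price hugs the band for 10 consecutive bars, that's ONE touch,
--     not 10. This filter ensures each counted touch is a distinct market event.
--     """
--     if len(touch_indices) < 2:
--         return True
--     sorted_idx = sorted(touch_indices)
--     for a, b in zip(sorted_idx, sorted_idx[1:]):
--         if b - a < min_separation: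
--             return False
--     return True
-- ===== SOURCE B (Python) =====
-- from typing import List
--
--
-- def touches_are_independent(
--     touch_indices: List[int],
--     min_separation: int = 5,
-- ) -> bool:
--     # Sort-free: compare every unordered pair directly.
--     if len(touch_indices) < 2:
--         return True
--     n = len(touch_indices)
--     for i in range(n):
--         for j in range(i + 1, n):
--             if abs(touch_indices[i] - touch_indices[j]) < min_separation:
--                 return False
--     return True
-- ===== Notes on version B (the rewrite author's own statement) =====
-- stated objective: alternative
-- what changed: Replaces sort-then-adjacent-gap scan with a direct nested pairwise loop checking abs differences, maintaining no sorted order.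
import Mathlib
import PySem

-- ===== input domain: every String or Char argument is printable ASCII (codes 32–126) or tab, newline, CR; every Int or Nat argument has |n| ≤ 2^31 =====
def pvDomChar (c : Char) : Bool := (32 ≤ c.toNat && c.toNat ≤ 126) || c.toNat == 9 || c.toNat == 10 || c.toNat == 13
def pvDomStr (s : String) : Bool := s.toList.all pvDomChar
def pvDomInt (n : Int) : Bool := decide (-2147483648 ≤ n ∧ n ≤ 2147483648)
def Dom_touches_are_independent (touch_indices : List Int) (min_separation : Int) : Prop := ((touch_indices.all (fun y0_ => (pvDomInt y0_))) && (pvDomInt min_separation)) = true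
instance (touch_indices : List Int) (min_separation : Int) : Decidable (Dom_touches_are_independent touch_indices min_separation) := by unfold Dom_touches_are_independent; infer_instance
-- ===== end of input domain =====

-- B replaces A's sort + adjacent-gap scan with a direct nested pairwise abs-difference check (alternative algorithm, same result).

-- ===== PORT A =====
-- A: guard on length < 2, sort, then scan adjacent pairs (zip of the sorted list with its tail).
def touches_are_independent (touch_indices : List Int) (min_separation : Int) : Bool :=
  if touch_indices.length < 2 then true
  else
    let sorted_idx := PySem.List.sorted touch_indices (fun x => x) false
    (sorted_idx.zip (sorted_idx.drop 1)).all (fun p => !decide (p.2 - p.1 < min_separation))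

-- ===== PORT B =====
-- B: outer loop over positions i (tails), inner loop over later positions j; abs difference.
def touchesAltAux (min_separation : Int) : List Int → Bool
  | [] => true
  | x :: rest =>
      (rest.all (fun y => !decide (|x - y| < min_separation))) && touchesAltAux min_separation rest

def touches_are_independent_alt (touch_indices : List Int) (min_separation : Int) : Bool :=
  if touch_indices.length < 2 then true
  else touchesAltAux min_separation touch_indices

-- ===== PRECONDITION & SPEC =====
def Spec_touches_are_independent (touch_indices : List Int) (min_separation : Int) (out : Bool) : Prop := out = touches_are_independent_alt touch_indices min_separation
instance (touch_indices : List Int) (min_separation : Int) (out : Bool) : Decidable (Spec_touches_are_independent touch_indices min_separation out) := by unfold Spec_touches_are_independent; infer_instance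

-- ===== CLAIM (what is proved, stated in full; the proofs are below) =====
def Claim_equal_touches_are_independent : Prop := ∀ (touch_indices : List Int) (min_separation : Int), Dom_touches_are_independent touch_indices min_separation → Spec_touches_are_independent touch_indices min_separation (touches_are_independent touch_indices min_separation)

-- ===== LEMMAS AND PROOFS =====

theorem touchesAltAux_eq_pairwise (m : Int) (l : List Int) :
    touchesAltAux m l = decide (l.Pairwise (fun x y => ¬ |x - y| < m)) := by
  induction l with
  | nil => simp [touchesAltAux]
  | cons x rest ih =>
      rw [Bool.eq_iff_iff]
      simp [touchesAltAux, ih, List.pairwise_cons, List.all_eq_true]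

theorem adjacent_scan_eq_pairwise (m : Int) :
    ∀ (s : List Int), s.Pairwise (fun a b : Int => a ≤ b) →
      ((s.zip (s.drop 1)).all (fun p => !decide (p.2 - p.1 < m))
        = decide (s.Pairwise (fun x y => ¬ |x - y| < m)))
  | [], _ => by simp
  | [x], _ => by simp
  | x :: y :: t, h => by
      have hx : ∀ z ∈ y :: t, x ≤ z := (List.pairwise_cons.mp h).1
      have ht : (y :: t).Pairwise (fun a b : Int => a ≤ b) := (List.pairwise_cons.mp h).2
      have ih := adjacent_scan_eq_pairwise m (y :: t) ht
      have hy : ∀ z ∈ t, y ≤ z := (List.pairwise_cons.mp ht).1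
      simp only [List.drop_one, List.tail_cons] at ih
      simp only [List.drop_one, List.tail_cons, List.zip_cons_cons, List.all_cons, ih]
      by_cases hgap : y - x < m
      · -- first gap too small: both sides false
        have : ¬ (x :: y :: t).Pairwise (fun x y => ¬ |x - y| < m) := by
          intro hp
          have := (List.pairwise_cons.mp hp).1 y (by simp)
          have hxy : x ≤ y := hx y (by simp)
          rw [abs_sub_comm, abs_of_nonneg (by omega)] at this
          omega
        simp only [hgap, decide_true, Bool.not_true, Bool.false_and]
        exact (decide_eq_false this).symm
      · -- first gap fine: heads satisfy pairwise against the whole tail since sorted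
        have hhead : ∀ z ∈ y :: t, ¬ |x - z| < m := by
          intro z hz
          have hxz : x ≤ z := hx z hz
          rw [abs_sub_comm, abs_of_nonneg (by omega)]
          rcases List.mem_cons.mp hz with rfl | hz
          · omega
          · have := hy z hz
            omega
        simp only [hgap, decide_false, Bool.not_false, Bool.true_and, decide_eq_decide]
        constructor
        · intro hp
          exact List.pairwise_cons.mpr ⟨hhead, hp⟩
        · intro hp
          exact (List.pairwise_cons.mp hp).2

theorem pairwise_perm_indep (m : Int) (l l' : List Int) (hp : l.Perm l') :
    l.Pairwise (fun x y => ¬ |x - y| < m) ↔ l'.Pairwise (fun x y => ¬ |x - y| < m) :=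
  hp.pairwise_iff (fun {a b} h => by rwa [abs_sub_comm] at h)

-- ===== VERDICT (by name: the statement is the Claim_ definition above) =====
theorem touches_are_independent_spec : Claim_equal_touches_are_independent := by
  intro ti m _
  unfold Spec_touches_are_independent touches_are_independent touches_are_independent_alt
  by_cases hlen : ti.length < 2
  · simp [hlen]
  · simp only [hlen, if_false]
    rw [touchesAltAux_eq_pairwise,
        adjacent_scan_eq_pairwise m _ (PySem.List.sorted_pairwise ti (fun x => x) |>.imp (fun h => h)),
        decide_eq_decide]
    exact pairwise_perm_indep m _ _ (PySem.List.sorted_perm ti (fun x => x) false)
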